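-- pv_equiv track=rewrite | github.com/All-Hands-AI/OpenHands | openhands/runtime/utils/edit.py | _whitespace_flexible_replace
-- ===== SOURCE A (Python) =====
-- def _whitespace_flexible_replace(
--     original_lines: list[str], search_lines: list[str], replace_lines: list[str]
-- ) -> list[str] | None:
--     """Attempts replacement ignoring consistent leading whitespace differences."""
--     search_len = len(search_lines)
--     if search_len == 0:
--         return None
--
--     # Calculate min leading whitespace in search block (ignoring blank lines)
--     search_leading_spaces = [len(s) - len(s.lstrip(' ')) for s in search_lines if s.strip()]
--     min_search_leading = min(search_leading_spaces) if search_leading_spaces else 0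
--     stripped_search_lines = [s[min_search_leading:] if s.strip() else s for s in search_lines]
--     stripped_search_tuple = tuple(stripped_search_lines)
--
--     for i in range(len(original_lines) - search_len + 1):
--         original_chunk = original_lines[i : i + search_len]
--
--         # Calculate min leading whitespace in original chunk
--         original_leading_spaces = [len(s) - len(s.lstrip(' ')) for s in original_chunk if s.strip()]
--         min_original_leading = min(original_leading_spaces) if original_leading_spaces else 0
--         leading_whitespace_prefix = ' ' * min_original_leading
--
--         # Strip original chunk consistently
--         stripped_original_lines = [s[min_original_leading:] if s.strip() else s for s in original_chunk]
--         stripped_original_tuple = tuple(stripped_original_lines)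
--
--         if stripped_search_tuple == stripped_original_tuple:
--             # Match found! Apply original leading whitespace to replace_lines
--             adjusted_replace_lines = [
--                 leading_whitespace_prefix + rline[min_search_leading:] if rline.strip() else rline
--                 for rline in replace_lines
--             ]
--             return original_lines[:i] + adjusted_replace_lines + original_lines[i + search_len :]
--     return None
-- ===== SOURCE B (Python) =====
-- def _whitespace_flexible_replace(
--     original_lines: list[str], search_lines: list[str], replace_lines: list[str]
-- ) -> list[str] | None:
--     """Replacement ignoring consistent leading-whitespace differences.
--
--     Analyses every line at most ONCE into (blank, leading-space count, core);
--     a window matches iff blanks/cores agree line by line and the leading-space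
--     offset is one constant d, so no per-window re-stripping/slicing is done.
--     """
--     m = len(search_lines)
--     if m == 0:
--         return None
--
--     def info(s):
--         if s.strip():
--             core = s.lstrip(' ')
--             return (False, len(s) - len(core), core)
--         return (True, 0, s)
--
--     s_info = [info(s) for s in search_lines]
--     min_search = min((l for b, l, _ in s_info if not b), default=0)
--     j0 = next((j for j in range(m) if not s_info[j][0]), None)
--
--     o_info = []  # filled lazily, one analysis per original line ever
--     for i in range(len(original_lines) - m + 1):
--         while len(o_info) < i + m:
--             o_info.append(info(original_lines[len(o_info)]))
--         d = o_info[i + j0][1] - s_info[j0][1] if j0 is not None else 0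
--         if all(
--             ob == sb and oc == sc and (sb or ol == sl + d)
--             for (sb, sl, sc), (ob, ol, oc) in zip(s_info, o_info[i:i + m])
--         ):
--             prefix = ' ' * (min_search + d)
--             return (
--                 original_lines[:i]
--                 + [prefix + r[min_search:] if r.strip() else r for r in replace_lines]
--                 + original_lines[i + m:]
--             )
--     return None
-- ===== Notes on version B (the rewrite author's own statement) =====
-- stated objective: alternative
-- what changed: Each line is analysed at most once into (blank, leading-space count, lstripped core) and a window matches iff blanks and cores agree line by line with one constant leading-space offset d taken from the first non-blank search line, replacing A's per-window min computation, re-stripping and stripped-tuple rebuild; worst-case cost is of the same order.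
import Mathlib
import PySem

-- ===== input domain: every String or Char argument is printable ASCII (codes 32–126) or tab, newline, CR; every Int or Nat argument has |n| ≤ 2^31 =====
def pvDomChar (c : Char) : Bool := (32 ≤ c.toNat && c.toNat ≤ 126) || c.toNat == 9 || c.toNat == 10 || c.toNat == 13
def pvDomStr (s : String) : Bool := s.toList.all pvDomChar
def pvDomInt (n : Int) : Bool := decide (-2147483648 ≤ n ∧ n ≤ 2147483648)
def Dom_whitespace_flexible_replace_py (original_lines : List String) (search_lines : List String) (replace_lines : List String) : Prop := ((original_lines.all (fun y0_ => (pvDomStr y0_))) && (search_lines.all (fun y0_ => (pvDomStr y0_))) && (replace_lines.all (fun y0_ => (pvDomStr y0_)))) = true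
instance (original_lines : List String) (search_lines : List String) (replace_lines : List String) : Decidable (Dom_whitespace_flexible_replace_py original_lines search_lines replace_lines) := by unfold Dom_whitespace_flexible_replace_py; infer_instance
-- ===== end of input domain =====

-- B re-implements A's window search without any per-window re-stripping: each line is
-- analysed once into (blank, leading-space count, core) and a window matches iff blanks and
-- cores agree line by line with one constant leading-space offset d. Return value only; no mutation.

-- shared transliterations of the Python builtin expressions both sources use:
-- "s.strip()" is falsy  ⟺  pvBlank
def pvBlank (s : List Char) : Bool := (PySem.Chars.strip s).isEmpty
-- "len(s) - len(s.lstrip(' '))"  (s.lstrip(' ') drops exactly the leading spaces = dropWhile (· == ' '))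
def pvLead (s : List Char) : Nat := s.length - (s.dropWhile (· == ' ')).length

-- ===== PORT A =====
-- "s[p:] if s.strip() else s"  (p : Nat, so the slice s[p:] is s.drop p, PySem.List.slice_from_natCast)
def pvStripA (p : Nat) (s : List Char) : List Char := if pvBlank s then s else s.drop p

-- "[len(s) - len(s.lstrip(' ')) for s in L if s.strip()]" then "min(leads) if leads else 0"
def pvMinLeadA (L : List (List Char)) : Nat :=
  let leads := (L.filter (fun s => !pvBlank s)).map pvLead
  (PySem.List.min? leads (fun x => x)).getD 0

-- the "for i in range(len(original_lines) - search_len + 1)" loop with early return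
def pvLoopA (original : List (List Char)) (m minS : Nat)
    (strippedSearch repl : List (List Char)) : List Nat → Option (List (List Char))
  | [] => none
  | i :: rest =>
    let chunk := (original.drop i).take m            -- original_lines[i : i + search_len]
    let minO := pvMinLeadA chunk
    let strippedChunk := chunk.map (pvStripA minO)
    if strippedSearch = strippedChunk then
      some (original.take i
        ++ repl.map (fun r => if pvBlank r then r
             else List.replicate minO ' ' ++ r.drop minS)   -- ' ' * minO + rline[minS:]
        ++ original.drop (i + m))
    else pvLoopA original m minS strippedSearch repl rest

def whitespace_flexible_replace_py (original_lines : List String) (search_lines : List String) (replace_lines : List String) : Option (List String) :=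
  let original := original_lines.map (·.toList)
  let search := search_lines.map (·.toList)
  let m := search.length
  if m = 0 then none
  else
    let minS := pvMinLeadA search
    let strippedSearch := search.map (pvStripA minS)
    (pvLoopA original m minS strippedSearch (replace_lines.map (·.toList))
        (List.range (original.length + 1 - m))).map (fun L => L.map String.ofList)

-- ===== PORT B =====
-- Source B's info(s): (blank, leading-space count, core); blank lines keep the whole line as core
def pvInfo (s : List Char) : Bool × Nat × List Char :=
  if pvBlank s then (true, 0, s)
  else
    let core := s.dropWhile (· == ' ')               -- s.lstrip(' ')
    (false, s.length - core.length, core)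

-- "min((l for b, l, _ in s_info if not b), default=0)"
def pvMinB (sinfo : List (Bool × Nat × List Char)) : Nat :=
  (PySem.List.min? ((sinfo.filter (fun t => !t.1)).map (fun t => t.2.1)) (fun x => x)).getD 0

-- the window test: "all(ob == sb and oc == sc and (sb or ol == sl + d) for … in zip(s_info, o_info[i:i+m]))"
def pvCheckB (d : Int) (sinfo oslice : List (Bool × Nat × List Char)) : Bool :=
  (sinfo.zip oslice).all (fun p =>
    p.2.1 == p.1.1 && p.2.2.2 == p.1.2.2 && (p.1.1 || ((p.2.2.1 : Int) == (p.1.2.1 : Int) + d)))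

-- Source B's main loop. Source B fills o_info lazily (one info() per original line, appended on demand);
-- the port passes the same fully evaluated list oinfo = original.map pvInfo: the loop body only ever
-- reads entries below i + m, which the lazy fill has produced, so the values read are identical.
def pvLoopB (original : List (List Char)) (m minS : Nat) (j0 : Option Nat)
    (sinfo oinfo : List (Bool × Nat × List Char)) (repl : List (List Char)) :
    List Nat → Option (List (List Char))
  | [] => none
  | i :: rest =>
    -- "o_info[i + j0][1] - s_info[j0][1] if j0 is not None else 0"  (both indices in range: getD)
    let d : Int := match j0 with
      | some j => ((oinfo.getD (i + j) (true, 0, [])).2.1 : Int) - ((sinfo.getD j (true, 0, [])).2.1 : Int)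
      | none => 0
    if pvCheckB d sinfo ((oinfo.drop i).take m) then    -- o_info[i:i+m]
      some (original.take i
        ++ repl.map (fun r => if pvBlank r then r
             else List.replicate ((minS : Int) + d).toNat ' ' ++ r.drop minS)  -- ' ' * (min_search + d) + r[min_search:]
        ++ original.drop (i + m))
    else pvLoopB original m minS j0 sinfo oinfo repl rest

def whitespace_flexible_replace_py_alt (original_lines : List String) (search_lines : List String) (replace_lines : List String) : Option (List String) :=
  let original := original_lines.map (·.toList)
  let search := search_lines.map (·.toList)
  let m := search.length
  if m = 0 then none
  else
    let sinfo := search.map pvInfo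
    let minS := pvMinB sinfo
    let j0 := sinfo.findIdx? (fun t => !t.1)   -- "next((j for j in range(m) if not s_info[j][0]), None)"
    let oinfo := original.map pvInfo
    (pvLoopB original m minS j0 sinfo oinfo (replace_lines.map (·.toList))
        (List.range (original.length + 1 - m))).map (fun L => L.map String.ofList)

-- ===== PRECONDITION & SPEC =====
def Spec_whitespace_flexible_replace_py (original_lines : List String) (search_lines : List String) (replace_lines : List String) (out : Option (List String)) : Prop := out = whitespace_flexible_replace_py_alt original_lines search_lines replace_lines
instance (original_lines : List String) (search_lines : List String) (replace_lines : List String) (out : Option (List String)) : Decidable (Spec_whitespace_flexible_replace_py original_lines search_lines replace_lines out) := by unfold Spec_whitespace_flexible_replace_py; infer_instance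

-- ===== CLAIM (what is proved, stated in full; the proofs are below) =====
def Claim_equal_whitespace_flexible_replace_py : Prop := ∀ (original_lines : List String) (search_lines : List String) (replace_lines : List String), Dom_whitespace_flexible_replace_py original_lines search_lines replace_lines → Spec_whitespace_flexible_replace_py original_lines search_lines replace_lines (whitespace_flexible_replace_py original_lines search_lines replace_lines)


-- ===== LEMMAS AND PROOFS =====

-- proof-side abbreviation for "s.lstrip(' ')"
def pvCore (s : List Char) : List Char := s.dropWhile (· == ' ')

-- the per-line matching condition B checks, as a Prop over the raw lines
def pvQ (d : Int) (s c : List Char) : Prop :=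
  pvBlank c = pvBlank s ∧
    (if pvBlank s = true then c = s
     else pvCore c = pvCore s ∧ (pvLead c : Int) = (pvLead s : Int) + d)

theorem pv_takeWhile_eq (s : List Char) :
    s.takeWhile (· == ' ') = List.replicate (pvLead s) ' ' := by
  rw [List.eq_replicate_iff]
  constructor
  · have := congrArg List.length (List.takeWhile_append_dropWhile (p := fun c => c == ' ') (l := s))
    simp only [List.length_append] at this
    unfold pvLead
    omega
  · intro b hb
    have := List.mem_takeWhile_imp hb
    simpa using this

theorem pv_decomp (s : List Char) :
    s = List.replicate (pvLead s) ' ' ++ pvCore s := by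
  conv_lhs => rw [← List.takeWhile_append_dropWhile (p := fun c => c == ' ') (l := s)]
  rw [pv_takeWhile_eq]
  rfl

theorem pv_drop_decomp (s : List Char) (p : Nat) (hp : p ≤ pvLead s) :
    s.drop p = List.replicate (pvLead s - p) ' ' ++ pvCore s := by
  conv_lhs => rw [pv_decomp s]
  rw [List.drop_append_of_le_length (by simpa using hp), List.drop_replicate]

theorem pv_blank_iff (s : List Char) :
    pvBlank s = true ↔ ∀ c ∈ s, PySem.Chars.isspace c = true := by
  unfold pvBlank PySem.Chars.strip PySem.Chars.rstrip PySem.Chars.lstrip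
  rw [List.isEmpty_iff]
  constructor
  · intro h c hc
    by_contra hcs
    have h1 : c ∈ s.dropWhile PySem.Chars.isspace := by
      have := List.takeWhile_append_dropWhile (p := PySem.Chars.isspace) (l := s)
      rcases List.mem_append.mp (this ▸ hc) with h' | h'
      · exact absurd (List.mem_takeWhile_imp h') (by simpa using hcs)
      · exact h'
    have h2 : c ∈ (s.dropWhile PySem.Chars.isspace).reverse.dropWhile PySem.Chars.isspace := by
      have := List.takeWhile_append_dropWhile (p := PySem.Chars.isspace)
        (l := (s.dropWhile PySem.Chars.isspace).reverse)
      rcases List.mem_append.mp (this ▸ (List.mem_reverse.mpr h1)) with h' | h'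
      · exact absurd (List.mem_takeWhile_imp h') (by simpa using hcs)
      · exact h'
    have hnil : (s.dropWhile PySem.Chars.isspace).reverse.dropWhile PySem.Chars.isspace = [] :=
      List.reverse_eq_nil_iff.mp h
    rw [hnil] at h2
    simp at h2
  · intro h
    have h1 : s.dropWhile PySem.Chars.isspace = [] :=
      List.dropWhile_eq_nil_iff.mpr (fun x hx => by simp [h x hx])
    simp [h1]

theorem pv_core_exists (s : List Char) (h : pvBlank s = false) :
    ∃ c ∈ pvCore s, PySem.Chars.isspace c = false := by
  have := (pv_blank_iff s)
  rw [h] at this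
  have h2 : ¬ ∀ c ∈ s, PySem.Chars.isspace c = true := by
    intro hall
    exact absurd (this.mpr hall) (by simp)
  simp only [not_forall, exists_prop] at h2
  obtain ⟨c, hc, hcs⟩ := h2
  refine ⟨c, ?_, by simpa using hcs⟩
  have hc' : (c == ' ') = false := by
    have : PySem.Chars.isspace ' ' = true := by decide
    by_contra hb
    simp only [Bool.not_eq_false, beq_iff_eq] at hb
    rw [hb] at hcs
    exact hcs this
  have := List.takeWhile_append_dropWhile (p := fun c => c == ' ') (l := s)
  rcases List.mem_append.mp (this ▸ hc) with h' | h'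
  · exact absurd (List.mem_takeWhile_imp h') (by simp [hc'])
  · exact h' 

theorem pv_core_ne_nil (s : List Char) (h : pvBlank s = false) : pvCore s ≠ [] := by
  obtain ⟨c, hc, -⟩ := pv_core_exists s h
  exact List.ne_nil_of_mem hc

-- a blank line never equals a suffix (below the leading spaces) of a non-blank line
theorem pv_blank_ne_drop (s t : List Char) (hs : pvBlank s = true) (ht : pvBlank t = false)
    (p : Nat) (hp : p ≤ pvLead t) : s ≠ t.drop p := by
  intro he
  obtain ⟨c, hc, hcs⟩ := pv_core_exists t ht
  have hmem : c ∈ s := by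
    rw [he, pv_drop_decomp t p hp]
    exact List.mem_append_right _ hc
  have := (pv_blank_iff s).mp hs c hmem
  rw [this] at hcs
  exact absurd hcs (by simp)

theorem pv_replicate_cancel (a b : Nat) (u v : List Char)
    (hu : u ≠ []) (hv : v ≠ []) (hu' : u.head hu ≠ ' ') (hv' : v.head hv ≠ ' ')
    (h : List.replicate a ' ' ++ u = List.replicate b ' ' ++ v) : a = b ∧ u = v := by
  induction a generalizing b with
  | zero =>
    cases b with
    | zero => simpa using h
    | succ b =>
      exfalso
      apply hu'
      have h' : u = ' ' :: (List.replicate b ' ' ++ v) := by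
        simpa [List.replicate_succ] using h
      subst h'
      rfl
  | succ a ih =>
    cases b with
    | zero =>
      exfalso
      apply hv'
      have h' : v = ' ' :: (List.replicate a ' ' ++ u) := by
        have := h.symm
        simpa [List.replicate_succ] using this
      subst h'
      rfl
    | succ b =>
      have h' : List.replicate a ' ' ++ u = List.replicate b ' ' ++ v := by
        simpa [List.replicate_succ] using h
      obtain ⟨he, hre⟩ := ih b h'
      exact ⟨by omega, hre⟩

theorem pv_core_head (s : List Char) (hne : pvCore s ≠ []) : (pvCore s).head hne ≠ ' ' := by
  have := List.head_dropWhile_not (fun c => c == ' ') hne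
  simpa using this

-- consistent-stripping comparison of two non-blank lines, characterised per line
theorem pv_drop_eq_iff (s t : List Char) (hs : pvBlank s = false) (ht : pvBlank t = false)
    (p q : Nat) (hp : p ≤ pvLead s) (hq : q ≤ pvLead t) :
    (s.drop p = t.drop q ↔ (pvLead s - p = pvLead t - q ∧ pvCore s = pvCore t)) := by
  rw [pv_drop_decomp s p hp, pv_drop_decomp t q hq]
  constructor
  · intro h
    exact pv_replicate_cancel _ _ _ _ (pv_core_ne_nil s hs) (pv_core_ne_nil t ht)
      (pv_core_head s _) (pv_core_head t _) h
  · rintro ⟨h1, h2⟩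
    rw [h1, h2]

theorem pv_minD_eq (L : List Nat) (w : Nat) (hw : w ∈ L) (hlb : ∀ x ∈ L, w ≤ x) :
    (PySem.List.min? L (fun x => x)).getD 0 = w := by
  cases h : PySem.List.min? L (fun x => x) with
  | none =>
    rw [PySem.List.min?_eq_none_iff] at h
    subst h
    simp at hw
  | some v =>
    have hv := PySem.List.min?_mem h
    have hmin := PySem.List.min?_isMin h
    simp only [Option.getD_some]
    exact Nat.le_antisymm (hmin w hw) (hlb v hv)

theorem pv_mem_leads (L : List (List Char)) (x : Nat) :
    (x ∈ (L.filter (fun s => !pvBlank s)).map pvLead) ↔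
      ∃ j, ∃ h : j < L.length, pvBlank L[j] = false ∧ pvLead L[j] = x := by
  constructor
  · intro hx
    obtain ⟨s, hs, rfl⟩ := List.mem_map.mp hx
    obtain ⟨hsL, hb⟩ := List.mem_filter.mp hs
    obtain ⟨j, hj, rfl⟩ := List.mem_iff_getElem.mp hsL
    exact ⟨j, hj, by simpa using hb, rfl⟩
  · rintro ⟨j, hj, hb, rfl⟩
    exact List.mem_map.mpr ⟨L[j], List.mem_filter.mpr ⟨List.mem_iff_getElem.mpr ⟨j, hj, rfl⟩,
      by simpa using hb⟩, rfl⟩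

theorem pv_minLeadA_le (L : List (List Char)) (j : Nat) (hj : j < L.length)
    (hb : pvBlank L[j] = false) : pvMinLeadA L ≤ pvLead L[j] := by
  unfold pvMinLeadA
  have hmem : pvLead L[j] ∈ (L.filter (fun s => !pvBlank s)).map pvLead :=
    (pv_mem_leads L _).mpr ⟨j, hj, hb, rfl⟩
  cases h : PySem.List.min? ((L.filter (fun s => !pvBlank s)).map pvLead) (fun x => x) with
  | none =>
    rw [PySem.List.min?_eq_none_iff] at h
    rw [h] at hmem
    simp at hmem
  | some v =>
    simp only []
    rw [h]
    simpa using PySem.List.min?_isMin h _ hmem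

theorem pv_minLeadA_blank (L : List (List Char))
    (h : ∀ j, (hj : j < L.length) → pvBlank L[j] = true) : pvMinLeadA L = 0 := by
  unfold pvMinLeadA
  have hnil : L.filter (fun s => !pvBlank s) = [] := by
    rw [List.filter_eq_nil_iff]
    intro s hs
    obtain ⟨j, hj, rfl⟩ := List.mem_iff_getElem.mp hs
    simp [h j hj]
  rw [hnil]
  simp [PySem.List.min?]

theorem pv_info_fst (s : List Char) : (pvInfo s).1 = pvBlank s := by
  unfold pvInfo
  split <;> simp_all

theorem pv_minB_eq (L : List (List Char)) : pvMinB (L.map pvInfo) = pvMinLeadA L := by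
  unfold pvMinB pvMinLeadA
  have hL : ((L.map pvInfo).filter (fun t => !t.1)).map (fun t => t.2.1)
      = (L.filter (fun s => !pvBlank s)).map pvLead := by
    rw [List.filter_map, List.map_map]
    have hfil : L.filter ((fun t => !t.1) ∘ pvInfo) = L.filter (fun s => !pvBlank s) := by
      apply List.filter_congr
      intro s _
      simp [Function.comp, pv_info_fst]
    rw [hfil]
    apply List.map_congr_left
    intro s hs
    have hb : pvBlank s = false := by
      have := (List.mem_filter.mp hs).2
      simpa using this
    simp only [Function.comp_apply]
    unfold pvInfo pvLead
    rw [hb]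
    simp
  rw [hL]

theorem pv_Qbool (d : Int) (s c : List Char) :
    ((pvInfo c).1 == (pvInfo s).1 && (pvInfo c).2.2 == (pvInfo s).2.2 &&
      ((pvInfo s).1 || (((pvInfo c).2.1 : Int) == ((pvInfo s).2.1 : Int) + d))) = true ↔ pvQ d s c := by
  unfold pvInfo pvQ pvCore pvLead
  cases hs : pvBlank s <;> cases hc : pvBlank c <;>
    simp only [if_true, if_false, Bool.false_eq_true, Bool.true_eq_false,
      Bool.and_eq_true, beq_iff_eq, Bool.false_or, Bool.true_or] <;>
    tauto

theorem pv_checkB_iff (d : Int) (S C : List (List Char)) (hlen : C.length = S.length) :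
    pvCheckB d (S.map pvInfo) (C.map pvInfo) = true ↔
      ∀ j, (hj : j < S.length) → pvQ d S[j] (C[j]'(hlen ▸ hj)) := by
  unfold pvCheckB
  rw [List.all_eq_true]
  constructor
  · intro h j hj
    have hj' : j < C.length := hlen ▸ hj
    have hz : j < ((S.map pvInfo).zip (C.map pvInfo)).length := by
      simp [hlen]
      omega
    have hmem := List.mem_iff_getElem.mpr ⟨j, hz, rfl⟩
    have := h _ hmem
    rw [List.getElem_zip] at this
    simp only [List.getElem_map] at this
    exact (pv_Qbool d _ _).mp this
  · intro h p hp
    obtain ⟨j, hz, rfl⟩ := List.mem_iff_getElem.mp hp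
    have hj : j < S.length := by
      simp at hz
      omega
    rw [List.getElem_zip]
    simp only [List.getElem_map]
    exact (pv_Qbool d _ _).mpr (h j hj)

theorem pv_mapeq_iff (f g : List Char → List Char) (S C : List (List Char))
    (hlen : C.length = S.length) :
    S.map f = C.map g ↔ ∀ j, (hj : j < S.length) → f S[j] = g (C[j]'(hlen ▸ hj)) := by
  constructor
  · intro h j hj
    have h1 : (S.map f)[j]'(by simpa using hj) = (C.map g)[j]'(by simp [hlen]; omega) :=
      List.getElem_of_eq h _
    simpa using h1
  · intro h
    apply List.ext_getElem (by simp [hlen])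
    intro j h1 h2
    simp only [List.getElem_map]
    exact h j (by simpa using h1)

-- pointwise Q with some non-blank search line pins the chunk minimum to minS + d
theorem pv_minO_of_Q (S C : List (List Char)) (hlen : C.length = S.length) (d : Int)
    (hQ : ∀ j, (hj : j < S.length) → pvQ d S[j] (C[j]'(hlen ▸ hj)))
    (j0 : Nat) (hj0 : j0 < S.length) (hb0 : pvBlank S[j0] = false) :
    (pvMinLeadA C : Int) = (pvMinLeadA S : Int) + d := by
  -- the minimum of the search leads is attained at some index j*
  have hmemS : pvLead S[j0] ∈ (S.filter (fun s => !pvBlank s)).map pvLead :=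
    (pv_mem_leads S _).mpr ⟨j0, hj0, hb0, rfl⟩
  cases hmin : PySem.List.min? ((S.filter (fun s => !pvBlank s)).map pvLead) (fun x => x) with
  | none =>
    rw [PySem.List.min?_eq_none_iff] at hmin
    rw [hmin] at hmemS
    simp at hmemS
  | some v =>
    have hminS : pvMinLeadA S = v := by
      unfold pvMinLeadA
      simp only []
      rw [hmin]
      rfl
    obtain ⟨js, hjs, hbs, hvs⟩ := (pv_mem_leads S v).mp (PySem.List.min?_mem hmin)
    have hlbS : ∀ x ∈ (S.filter (fun s => !pvBlank s)).map pvLead, v ≤ x := by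
      intro x hx
      simpa using PySem.List.min?_isMin hmin _ hx
    -- Q at jception js: the corresponding chunk line
    have hQs := hQ js hjs
    unfold pvQ at hQs
    rw [hbs] at hQs
    obtain ⟨hbc, hQs2⟩ := hQs
    simp only [Bool.false_eq_true, if_false] at hQs2
    obtain ⟨-, hleadC⟩ := hQs2
    -- pvMinLeadA C equals pvLead of the chunk line at js
    have hCmin : pvMinLeadA C = pvLead (C[js]'(hlen ▸ hjs)) := by
      unfold pvMinLeadA
      simp only []
      apply pv_minD_eq
      · exact (pv_mem_leads C _).mpr ⟨js, hlen ▸ hjs, hbc, rfl⟩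
      · intro x hx
        obtain ⟨j, hj, hbcj, rfl⟩ := (pv_mem_leads C x).mp hx
        have hj' : j < S.length := by omega
        have hQj := hQ j hj'
        unfold pvQ at hQj
        obtain ⟨hbeq, hQj2⟩ := hQj
        have hbsj : pvBlank S[j] = false := by rw [← hbeq]; exact (by simpa using hbcj)
        rw [hbsj] at hQj2
        simp only [Bool.false_eq_true, if_false] at hQj2
        obtain ⟨-, hleadj⟩ := hQj2
        have hvle : v ≤ pvLead S[j] :=
          hlbS _ ((pv_mem_leads S _).mpr ⟨j, hj', hbsj, rfl⟩)
        have : (pvLead (C[js]'(hlen ▸ hjs)) : Int) ≤ (pvLead (C[j]'hj) : Int) := by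
          rw [hleadC, hleadj, hvs]
          omega
        exact_mod_cast this
    rw [hCmin, hminS, hleadC, hvs]

-- the central window lemma: A's stripped-tuple comparison ⟺ B's per-line check,
-- and on a match the two leading-whitespace prefixes agree
theorem pv_window (S C : List (List Char)) (hlen : C.length = S.length)
    (d : Int)
    (hd : d = match (S.map pvInfo).findIdx? (fun t => !t.1) with
      | some j => (((C.map pvInfo).getD j (true, 0, [])).2.1 : Int) - (((S.map pvInfo).getD j (true, 0, [])).2.1 : Int)
      | none => 0) :
    ((S.map (pvStripA (pvMinLeadA S)) = C.map (pvStripA (pvMinLeadA C))) ↔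
        pvCheckB d (S.map pvInfo) (C.map pvInfo) = true)
      ∧ (S.map (pvStripA (pvMinLeadA S)) = C.map (pvStripA (pvMinLeadA C)) →
          ((pvMinLeadA S : Int) + d).toNat = pvMinLeadA C) := by
  cases hfind : (S.map pvInfo).findIdx? (fun t => !t.1) with
  | none =>
    -- every search line is blank
    rw [hfind] at hd
    have hall : ∀ j, (hj : j < S.length) → pvBlank S[j] = true := by
      intro j hj
      have := List.findIdx?_eq_none_iff.mp hfind (pvInfo S[j])
        (List.mem_map.mpr ⟨S[j], List.mem_iff_getElem.mpr ⟨j, hj, rfl⟩, rfl⟩)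
      simpa [pv_info_fst] using this
    have hminS : pvMinLeadA S = 0 := pv_minLeadA_blank S hall
    have hfw : S.map (pvStripA (pvMinLeadA S)) = C.map (pvStripA (pvMinLeadA C)) →
        (∀ j, (hj : j < S.length) → pvBlank (C[j]'(hlen ▸ hj)) = true ∧ C[j]'(hlen ▸ hj) = S[j]) := by
      intro hA j hj
      have hpt := (pv_mapeq_iff _ _ S C hlen).mp hA j hj
      have hbS := hall j hj
      unfold pvStripA at hpt
      rw [hbS] at hpt
      simp only [if_true] at hpt
      by_cases hbC : pvBlank (C[j]'(hlen ▸ hj)) = true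
      · rw [hbC] at hpt
        simp only [if_true] at hpt
        exact ⟨hbC, hpt.symm⟩
      · exfalso
        have hbC' : pvBlank (C[j]'(hlen ▸ hj)) = false := by simpa using hbC
        rw [hbC'] at hpt
        simp only [Bool.false_eq_true, if_false] at hpt
        exact pv_blank_ne_drop S[j] (C[j]'(hlen ▸ hj)) hbS hbC' _
          (pv_minLeadA_le C j (hlen ▸ hj) hbC') hpt
    constructor
    · constructor
      · intro hA
        rw [pv_checkB_iff d S C hlen]
        intro j hj
        obtain ⟨hbC, hCS⟩ := hfw hA j hj
        unfold pvQ
        rw [hall j hj, hbC]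
        simp [hCS]
      · intro hchk
        rw [pv_checkB_iff d S C hlen] at hchk
        rw [pv_mapeq_iff _ _ S C hlen]
        intro j hj
        have hQj := hchk j hj
        unfold pvQ at hQj
        rw [hall j hj] at hQj
        simp only [if_true] at hQj
        unfold pvStripA
        rw [hall j hj, hQj.1]
        simp [hQj.2]
    · intro hA
      have hminO : pvMinLeadA C = 0 := by
        apply pv_minLeadA_blank
        intro j hj
        exact (hfw hA j (by omega)).1
      rw [hminS, hminO, hd]
      rfl
  | some j0 =>
    rw [hfind] at hd
    obtain ⟨hj0m, hb0m, -⟩ := List.findIdx?_eq_some_iff_getElem.mp hfind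
    have hj0 : j0 < S.length := by simpa using hj0m
    have hj0C : j0 < C.length := by omega
    have hb0 : pvBlank S[j0] = false := by
      have := hb0m
      simp only [List.getElem_map, pv_info_fst] at this
      simpa using this
    -- unfold the two getD reads: both indices are in range
    have hdS : ((S.map pvInfo).getD j0 (true, 0, [])).2.1 = pvLead S[j0] := by
      rw [List.getD_eq_getElem _ _ (by simpa using hj0)]
      simp only [List.getElem_map]
      unfold pvInfo
      rw [hb0]
      simp [pvLead]
    have hdC : ((C.map pvInfo).getD j0 (true, 0, [])).2.1
        = (if pvBlank (C[j0]'hj0C) then 0 else pvLead (C[j0]'hj0C)) := by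
      rw [List.getD_eq_getElem _ _ (by simpa using hj0C)]
      simp only [List.getElem_map]
      unfold pvInfo
      split <;> simp [pvLead]
    have hd' : d = (((if pvBlank (C[j0]'hj0C) then 0 else pvLead (C[j0]'hj0C)) : Nat) : Int)
        - (pvLead S[j0] : Int) := by
      rw [← hdS, ← hdC]
      exact hd
    -- forward: A's stripped-window equality gives the pointwise conditions and the min relation
    have hfw : S.map (pvStripA (pvMinLeadA S)) = C.map (pvStripA (pvMinLeadA C)) →
        ((pvMinLeadA C : Int) = (pvMinLeadA S : Int) + d ∧
          ∀ j, (hj : j < S.length) → pvQ d S[j] (C[j]'(hlen ▸ hj))) := by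
      intro hA
      have hpt := (pv_mapeq_iff _ _ S C hlen).mp hA
      -- pointwise analysis
      have hptQ : ∀ j, (hj : j < S.length) →
          (pvBlank (C[j]'(hlen ▸ hj)) = pvBlank S[j]) ∧
          (pvBlank S[j] = true → C[j]'(hlen ▸ hj) = S[j]) ∧
          (pvBlank S[j] = false → pvCore (C[j]'(hlen ▸ hj)) = pvCore S[j] ∧
            pvLead S[j] - pvMinLeadA S = pvLead (C[j]'(hlen ▸ hj)) - pvMinLeadA C ∧
            pvMinLeadA S ≤ pvLead S[j] ∧ pvMinLeadA C ≤ pvLead (C[j]'(hlen ▸ hj))) := by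
        intro j hj
        have hp := hpt j hj
        unfold pvStripA at hp
        by_cases hbS : pvBlank S[j] = true
        · rw [hbS] at hp
          simp only [if_true] at hp
          by_cases hbC : pvBlank (C[j]'(hlen ▸ hj)) = true
          · rw [hbC] at hp
            simp only [if_true] at hp
            exact ⟨by rw [hbS, hbC], fun _ => hp.symm, fun h => by rw [hbS] at h; cases h⟩
          · exfalso
            have hbC' : pvBlank (C[j]'(hlen ▸ hj)) = false := by simpa using hbC
            rw [hbC'] at hp
            simp only [Bool.false_eq_true, if_false] at hp
            exact pv_blank_ne_drop S[j] (C[j]'(hlen ▸ hj)) hbS hbC' _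
              (pv_minLeadA_le C j (hlen ▸ hj) hbC') hp
        · have hbS' : pvBlank S[j] = false := by simpa using hbS
          rw [hbS'] at hp
          simp only [Bool.false_eq_true, if_false] at hp
          have hleS : pvMinLeadA S ≤ pvLead S[j] := pv_minLeadA_le S j hj hbS'
          by_cases hbC : pvBlank (C[j]'(hlen ▸ hj)) = true
          · exfalso
            rw [hbC] at hp
            simp only [if_true] at hp
            exact pv_blank_ne_drop (C[j]'(hlen ▸ hj)) S[j] hbC hbS' _ hleS hp.symm
          · have hbC' : pvBlank (C[j]'(hlen ▸ hj)) = false := by simpa using hbC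
            rw [hbC'] at hp
            simp only [Bool.false_eq_true, if_false] at hp
            have hleC : pvMinLeadA C ≤ pvLead (C[j]'(hlen ▸ hj)) :=
              pv_minLeadA_le C j (hlen ▸ hj) hbC'
            obtain ⟨hsub, hcore⟩ := (pv_drop_eq_iff S[j] (C[j]'(hlen ▸ hj)) hbS' hbC'
              _ _ hleS hleC).mp hp
            refine ⟨by rw [hbS', hbC'], fun h => ?_, fun _ => ⟨hcore.symm, hsub, hleS, hleC⟩⟩
            rw [hbS'] at h
            cases h
      -- the min relation, read off at j0
      obtain ⟨hbeq0, -, hnb0⟩ := hptQ j0 hj0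
      obtain ⟨-, hsub0, hleS0, hleC0⟩ := hnb0 hb0
      have hbC0 : pvBlank (C[j0]'hj0C) = false := by rw [hbeq0, hb0]
      have hdval : d = (pvLead (C[j0]'hj0C) : Int) - (pvLead S[j0] : Int) := by
        rw [hd', hbC0]
        simp
      have hminrel : (pvMinLeadA C : Int) = (pvMinLeadA S : Int) + d := by
        rw [hdval]
        have h1 : pvLead S[j0] - pvMinLeadA S = pvLead (C[j0]'hj0C) - pvMinLeadA C := hsub0
        omega
      refine ⟨hminrel, fun j hj => ?_⟩
      obtain ⟨hbeq, hbl, hnb⟩ := hptQ j hj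
      unfold pvQ
      refine ⟨hbeq, ?_⟩
      by_cases hbS : pvBlank S[j] = true
      · rw [hbS]
        simp only [if_true]
        exact hbl hbS
      · have hbS' : pvBlank S[j] = false := by simpa using hbS
        rw [hbS']
        simp only [Bool.false_eq_true, if_false]
        obtain ⟨hcore, hsub, hleS, hleC⟩ := hnb hbS'
        refine ⟨hcore, ?_⟩
        omega
    constructor
    · constructor
      · intro hA
        rw [pv_checkB_iff d S C hlen]
        exact (hfw hA).2
      · intro hchk
        rw [pv_checkB_iff d S C hlen] at hchk
        have hminrel : (pvMinLeadA C : Int) = (pvMinLeadA S : Int) + d :=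
          pv_minO_of_Q S C hlen d hchk j0 hj0 hb0
        rw [pv_mapeq_iff _ _ S C hlen]
        intro j hj
        have hQj := hchk j hj
        unfold pvQ at hQj
        obtain ⟨hbeq, hQ2⟩ := hQj
        unfold pvStripA
        by_cases hbS : pvBlank S[j] = true
        · rw [hbS] at hQ2 ⊢
          simp only [if_true] at hQ2 ⊢
          rw [hbeq, hbS]
          simp [hQ2]
        · have hbS' : pvBlank S[j] = false := by simpa using hbS
          rw [hbS'] at hQ2 ⊢
          simp only [Bool.false_eq_true, if_false] at hQ2 ⊢
          have hbC' : pvBlank (C[j]'(hlen ▸ hj)) = false := by rw [hbeq, hbS']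
          rw [hbC']
          simp only [Bool.false_eq_true, if_false]
          obtain ⟨hcore, hlead⟩ := hQ2
          have hleS : pvMinLeadA S ≤ pvLead S[j] := pv_minLeadA_le S j hj hbS'
          have hleC : pvMinLeadA C ≤ pvLead (C[j]'(hlen ▸ hj)) :=
            pv_minLeadA_le C j (hlen ▸ hj) hbC'
          rw [pv_drop_eq_iff S[j] (C[j]'(hlen ▸ hj)) hbS' hbC' _ _ hleS hleC]
          exact ⟨by omega, hcore.symm⟩
    · intro hA
      have hminrel := (hfw hA).1
      omega

theorem main_loop_eq (original search repl : List (List Char)) (idxs : List Nat)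
    (hidx : ∀ i ∈ idxs, i + search.length ≤ original.length) :
    pvLoopA original search.length (pvMinLeadA search) (search.map (pvStripA (pvMinLeadA search))) repl idxs
    = pvLoopB original search.length (pvMinB (search.map pvInfo)) ((search.map pvInfo).findIdx? (fun t => !t.1))
        (search.map pvInfo) (original.map pvInfo) repl idxs := by
  induction idxs with
  | nil => rfl
  | cons i rest ih =>
    have hi : i + search.length ≤ original.length := hidx i (List.mem_cons_self)
    have hrest := fun i' h => hidx i' (List.mem_cons_of_mem _ h)
    have hClen : ((original.drop i).take search.length).length = search.length := by
      simp
      omega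
    have hslice : ((original.map pvInfo).drop i).take search.length
        = ((original.drop i).take search.length).map pvInfo := by
      rw [← List.map_drop, ← List.map_take]
    have hgetD : ∀ j, j < search.length →
        (original.map pvInfo).getD (i + j) (true, 0, []) =
          (((original.drop i).take search.length).map pvInfo).getD j (true, 0, []) := by
      intro j hj
      rw [List.getD_eq_getElem _ _ (by simp; omega),
        List.getD_eq_getElem _ _ (by simp; omega)]
      simp only [List.getElem_map]
      congr 1
      rw [List.getElem_take, List.getElem_drop]
    -- the offset computed by B, in the form the window lemma expects
    have hdB : (match (search.map pvInfo).findIdx? (fun t => !t.1) with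
        | some j => (((original.map pvInfo).getD (i + j) (true, 0, [])).2.1 : Int)
            - (((search.map pvInfo).getD j (true, 0, [])).2.1 : Int)
        | none => (0 : Int))
        = (match (search.map pvInfo).findIdx? (fun t => !t.1) with
        | some j => (((((original.drop i).take search.length).map pvInfo)).getD j (true, 0, [])).2.1
            - (((search.map pvInfo).getD j (true, 0, [])).2.1 : Int)
        | none => (0 : Int)) := by
      cases hfind : (search.map pvInfo).findIdx? (fun t => !t.1) with
      | none => rfl
      | some j =>
        obtain ⟨hjm, -, -⟩ := List.findIdx?_eq_some_iff_getElem.mp hfind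
        have hj : j < search.length := by simpa using hjm
        simp only []
        rw [hgetD j hj]
    obtain ⟨hiff, hout⟩ := pv_window search ((original.drop i).take search.length) hClen _ rfl
    rw [pvLoopA, pvLoopB.eq_def]
    simp only [hslice, hdB, pv_minB_eq]
    by_cases hmatch : List.map (pvStripA (pvMinLeadA search)) search =
        List.map (pvStripA (pvMinLeadA (List.take search.length (List.drop i original))))
          (List.take search.length (List.drop i original))
    · rw [if_pos hmatch, if_pos (hiff.mp hmatch), hout hmatch]
    · rw [if_neg hmatch, if_neg (fun h => hmatch (hiff.mpr h))]
      have := ih hrest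
      rw [pv_minB_eq] at this
      exact this

-- ===== VERDICT (by name: the statement is the Claim_ definition above) =====
theorem whitespace_flexible_replace_py_spec : Claim_equal_whitespace_flexible_replace_py := by
  intro ol sl rl _
  unfold Spec_whitespace_flexible_replace_py
  unfold whitespace_flexible_replace_py whitespace_flexible_replace_py_alt
  simp only []
  by_cases h : (sl.map (·.toList)).length = 0
  · simp [h]
  · simp only [h]
    rw [main_loop_eq]
    intro i hi
    have := List.mem_range.mp hi
    omega
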